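-- pv_equiv track=rewrite | github.com/pypi-data/pypi-mirror-389 | packages/securecode-ai/securecode_ai-1.0.0-py3-none-any.whl/securecli/agents/auditor.py | _extract_imports_and_dependencies
-- ===== SOURCE A (Python) =====
-- from typing import Dict, List, Any, Optional, Tuple
--
-- def _extract_imports_and_dependencies(lines: List[str]) -> str:
--     """Extract imports to understand available security libraries"""
--     try:
--         imports = []
--         security_libs = []
--
--         for line in lines[:100]:  # Check first 100 lines for imports
--             line = line.strip()
--             if line.startswith('import ') or line.startswith('from '):
--                 imports.append(line)
--
--                 # Check for security-related libraries
--                 if any(lib in line.lower() for lib in ['bcrypt', 'hashlib', 'hmac', 'secrets', 'ssl', 'cryptography']):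
--                     security_libs.append(line)
--
--         result = []
--         if security_libs:
--             result.append(f"SECURITY LIBRARIES: {', '.join(security_libs)}")
--         if imports:
--             result.append(f"TOTAL IMPORTS: {len(imports)}")
--             result.append(f"KEY IMPORTS: {'; '.join(imports[:5])}")
--
--         return '\n'.join(result) if result else "No imports detected"
--     except Exception:
--         return "Import analysis unavailable"
-- ===== SOURCE B (Python) =====
-- SECURITY_KEYWORDS = ('bcrypt', 'hashlib', 'hmac', 'secrets', 'ssl', 'cryptography')
--
-- def _collect_imports(chunk):
--     """Recursively collect the stripped import/from lines of chunk (built back-to-front)."""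
--     if not chunk:
--         return []
--     head = chunk[0].strip()
--     rest = _collect_imports(chunk[1:])
--     if head.startswith(('import ', 'from ')):
--         return [head] + rest
--     return rest
--
-- def _mentions_security(s):
--     low = s.lower()
--     return any(k in low for k in SECURITY_KEYWORDS)
--
-- def _extract_imports_and_dependencies(lines):
--     """Extract imports to understand available security libraries"""
--     try:
--         imports = _collect_imports(lines[:100])
--         security_libs = [s for s in imports if _mentions_security(s)]
--         parts = []
--         if security_libs:
--             parts.append("SECURITY LIBRARIES: " + ", ".join(security_libs))
--         if imports:
--             parts.append("TOTAL IMPORTS: %d" % len(imports))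
--             parts.append("KEY IMPORTS: " + "; ".join(imports[:5]))
--         return "\n".join(parts) if parts else "No imports detected"
--     except Exception:
--         return "Import analysis unavailable"
-- ===== Notes on version B (the rewrite author's own statement) =====
-- stated objective: alternative
-- what changed: Replaces A's iterative loop with an inline nested security branch by a recursive collector that builds the import list on the way back out of the recursion, with security_libs derived afterwards as a separate filter over that list.
import Mathlib
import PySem

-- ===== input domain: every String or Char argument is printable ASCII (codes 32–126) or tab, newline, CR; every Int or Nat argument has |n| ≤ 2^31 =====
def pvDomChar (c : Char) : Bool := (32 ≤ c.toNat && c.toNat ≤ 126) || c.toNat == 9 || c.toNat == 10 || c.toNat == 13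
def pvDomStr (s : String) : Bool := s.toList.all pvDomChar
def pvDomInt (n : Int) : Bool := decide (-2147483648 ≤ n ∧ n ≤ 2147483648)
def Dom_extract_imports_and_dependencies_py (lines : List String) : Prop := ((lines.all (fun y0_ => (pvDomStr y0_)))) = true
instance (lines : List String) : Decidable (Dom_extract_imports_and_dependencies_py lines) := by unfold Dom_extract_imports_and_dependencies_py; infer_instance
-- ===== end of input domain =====

-- B replaces A's loop with inline security branch by a recursive collector
-- building the import list on the way back out of the recursion, with
-- security_libs derived afterwards by a separate filter; objective: alternative.

-- ===== PORT A =====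
def pvSecLibs : List String := ["bcrypt", "hashlib", "hmac", "secrets", "ssl", "cryptography"]

-- A's loop body: state = (imports, security_libs), processed per raw line
def pvAStep (st : List String × List String) (line0 : String) : List String × List String :=
  let line := PySem.Str.strip line0
  if PySem.Str.startswith line "import " || PySem.Str.startswith line "from " then
    let imports := st.1 ++ [line]
    let security_libs :=
      if pvSecLibs.any (fun lib => PySem.Str.isIn lib (PySem.Str.lower line)) then
        st.2 ++ [line]
      else st.2
    (imports, security_libs)
  else st

def extract_imports_and_dependencies_py (lines : List String) : String :=
  let st := (PySem.List.slice lines none (some 100)).foldl pvAStep ([], [])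
  let imports := st.1
  let security_libs := st.2
  let result : List String :=
    (if security_libs ≠ [] then
      ["SECURITY LIBRARIES: " ++ PySem.Str.join ", " security_libs] else []) ++
    (if imports ≠ [] then
      ["TOTAL IMPORTS: " ++ PySem.Int.toStr (imports.length : Int),
       "KEY IMPORTS: " ++ PySem.Str.join "; " (PySem.List.slice imports none (some 5))] else [])
  if result ≠ [] then PySem.Str.join "\n" result else "No imports detected"

-- ===== PORT B =====
-- recursive collector (Source B's _collect_imports), building the list back-to-front
def pvCollect : List String → List String
  | [] => []
  | l :: chunk =>
    let head := PySem.Str.strip l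
    let rest := pvCollect chunk
    if PySem.Str.startswith head "import " || PySem.Str.startswith head "from " then
      [head] ++ rest
    else rest

-- Source B's _mentions_security
def pvMentionsSecurity (s : String) : Bool :=
  let low := PySem.Str.lower s
  pvSecLibs.any (fun k => PySem.Str.isIn k low)

def extract_imports_and_dependencies_py_alt (lines : List String) : String :=
  let imports := pvCollect (PySem.List.slice lines none (some 100))
  let security_libs := imports.filter pvMentionsSecurity
  let parts : List String :=
    (if security_libs ≠ [] then
      ["SECURITY LIBRARIES: " ++ PySem.Str.join ", " security_libs] else []) ++
    (if imports ≠ [] then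
      ["TOTAL IMPORTS: " ++ PySem.Int.toStr (imports.length : Int),
       "KEY IMPORTS: " ++ PySem.Str.join "; " (PySem.List.slice imports none (some 5))] else [])
  if parts ≠ [] then PySem.Str.join "\n" parts else "No imports detected"

-- ===== PRECONDITION & SPEC =====
def Spec_extract_imports_and_dependencies_py (lines : List String) (out : String) : Prop := out = extract_imports_and_dependencies_py_alt lines
instance (lines : List String) (out : String) : Decidable (Spec_extract_imports_and_dependencies_py lines out) := by unfold Spec_extract_imports_and_dependencies_py; infer_instance

-- ===== CLAIM =====
def Claim_equal_extract_imports_and_dependencies_py : Prop := ∀ (lines : List String), Dom_extract_imports_and_dependencies_py lines → Spec_extract_imports_and_dependencies_py lines (extract_imports_and_dependencies_py lines)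

-- ===== LEMMAS AND PROOFS =====

def pvIsImport (s : String) : Bool :=
  PySem.Str.startswith s "import " || PySem.Str.startswith s "from "

-- B's recursive collector computes the stripped import lines of the first n lines.
lemma pvCollect_eq (l : List String) :
    pvCollect l = (l.map PySem.Str.strip).filter pvIsImport := by
  induction l with
  | nil => simp [pvCollect]
  | cons x xs ih =>
    simp only [pvCollect, List.map_cons, List.filter_cons]
    by_cases h : pvIsImport (PySem.Str.strip x) = true
    · simp [pvIsImport] at h
      simp [h, ih, pvIsImport]
    · simp [pvIsImport] at h
      simp [h, ih, pvIsImport]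

-- A's fold accumulates exactly the stripped import lines and their security subfilter.
lemma pvFold_eq (l : List String) (i s : List String) :
    l.foldl pvAStep (i, s) =
      (i ++ ((l.map PySem.Str.strip).filter pvIsImport),
       s ++ (((l.map PySem.Str.strip).filter pvIsImport).filter pvMentionsSecurity)) := by
  induction l generalizing i s with
  | nil => simp
  | cons x xs ih =>
    simp only [List.foldl_cons, List.map_cons, List.filter_cons]
    rw [pvAStep]
    simp only [pvIsImport]
    split_ifs with h1 h2
    · have h2' : pvMentionsSecurity (PySem.Str.strip x) = true := h2
      simp [ih, h2', List.append_assoc, pvIsImport]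
    · have h2' : pvMentionsSecurity (PySem.Str.strip x) = false := eq_false_of_ne_true h2
      simp [ih, h2', List.append_assoc, pvIsImport]
    · simp [ih, pvIsImport]

-- ===== VERDICT =====
theorem extract_imports_and_dependencies_py_spec : Claim_equal_extract_imports_and_dependencies_py := by
  intro lines _
  unfold Spec_extract_imports_and_dependencies_py
  unfold extract_imports_and_dependencies_py extract_imports_and_dependencies_py_alt
  rw [pvFold_eq, pvCollect_eq]
  simp
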